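-- pv_equiv track=rewrite | github.com/mratet/advent-of-code_python | solutions/2022/day_07.py | part_2
-- ===== SOURCE A (Python) =====
-- from dataclasses import dataclass
--
-- class Dir:
--     def __init__(self, name, parent=None):
--         self.name = name
--         self.parent = parent
--         self.children_dirs = []
--         self.children_files = []
--
-- @dataclass
-- class File:
--     name: str
--     size: int
--
-- def parse_filesystem(lines):
--     root = Dir("/")
--     current = root
--     all_dirs = [root]
--     i = 0
--
--     while i < len(lines):
--         line = lines[i]
--         if line.startswith("$"):
--             cmd_parts = line[2:].split()
--             cmd = cmd_parts[0]
--
--             if cmd == "ls":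
--                 i += 1
--                 while i < len(lines) and not lines[i].startswith("$"):
--                     item = lines[i].split()
--                     if item[0].isdigit():
--                         size = int(item[0])
--                         name = item[1]
--                         if not any(f.name == name for f in current.children_files):
--                             current.children_files.append(File(name, size))
--                     else:
--                         name = item[1]
--                         if not any(d.name == name for d in current.children_dirs):
--                             new_dir = Dir(name, parent=current)
--                             current.children_dirs.append(new_dir)
--                             all_dirs.append(new_dir)
--                     i += 1
--                 continue  # skip the i += 1 below, already moved
--             elif cmd == "cd":
--                 target = cmd_parts[1]
--                 if target == "/":
--                     current = root
--                 elif target == "..":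
--                     current = current.parent if current.parent else current
--                 else:
--                     current = next(d for d in current.children_dirs if d.name == target)
--         i += 1
--
--     return root, all_dirs
--
-- def compute_directory_size(directory):
--     size = sum(f.size for f in directory.children_files)
--     for sub_dir in directory.children_dirs:
--         size += compute_directory_size(sub_dir)
--     return size
--
-- def part_2(lines):
--     root_dir, all_dirs = parse_filesystem(lines)
--     TOTAL_SPACE = 70_000_000
--     NEEDED_SPACE = 30_000_000
--     used_space = compute_directory_size(root_dir)
--     free_space = TOTAL_SPACE - used_space
--     missing_space = NEEDED_SPACE - free_space
--
--     valid_dirs = [d for d in all_dirs if compute_directory_size(d) >= missing_space]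
--     smallest = min(valid_dirs, key=compute_directory_size)
--
--     return compute_directory_size(smallest)
-- ===== SOURCE B (Python) =====
-- def part_2(lines):
--     # One pass over the session building path-keyed tables, then one bottom-up
--     # size accumulation and a single min scan (A recomputes subtree sizes recursively
--     # for every directory).
--     files = {}            # path tuple -> {file name: size}, first listing wins
--     known = {(): True}    # directory paths in first-seen order
--     cur = ()
--     listing = False
--     for line in lines:
--         if line.startswith("$"):
--             listing = False
--             parts = line[2:].split()
--             if parts[0] == "ls":
--                 listing = True
--             elif parts[0] == "cd":
--                 target = parts[1]
--                 if target == "/":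
--                     cur = ()
--                 elif target == "..":
--                     cur = cur[:-1]
--                 else:
--                     cur = cur + (target,)
--         elif listing:
--             tok = line.split()
--             if tok[0].isdigit():
--                 files.setdefault(cur, {}).setdefault(tok[1], int(tok[0]))
--             else:
--                 known.setdefault(cur + (tok[1],), True)
--     totals = {p: 0 for p in known}
--     for q, m in files.items():
--         s = sum(m.values())
--         for k in range(len(q) + 1):
--             pref = q[:k]
--             if pref in totals:
--                 totals[pref] += s
--     missing = totals[()] - 40_000_000
--     return min(s for s in totals.values() if s >= missing)
-- ===== Notes on version B (the rewrite author's own statement) =====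
-- stated objective: alternative
-- what changed: B replaces A's mutable Dir tree plus a fresh recursive compute_directory_size walk for every directory (and again inside the filter and min) by one flag-driven pass that tables files and directories per path, one bottom-up accumulation that adds each directory's file total to all of its ancestors once, and a single min scan over the totals.
import Mathlib
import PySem

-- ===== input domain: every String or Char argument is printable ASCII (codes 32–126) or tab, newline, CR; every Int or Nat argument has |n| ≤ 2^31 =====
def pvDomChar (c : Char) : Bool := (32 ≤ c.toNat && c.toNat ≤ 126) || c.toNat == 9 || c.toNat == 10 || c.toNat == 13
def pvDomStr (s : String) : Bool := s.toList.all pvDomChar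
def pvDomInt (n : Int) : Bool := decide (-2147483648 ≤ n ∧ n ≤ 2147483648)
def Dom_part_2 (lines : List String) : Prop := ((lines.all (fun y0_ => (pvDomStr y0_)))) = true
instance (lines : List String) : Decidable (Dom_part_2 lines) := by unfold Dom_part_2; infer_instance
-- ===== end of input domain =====

-- B replaces A's repeated recursive directory-size computation (one full subtree walk per
-- directory) by a single pass that tables files and directories per path and one bottom-up
-- accumulation of every directory's total, then a single min scan.

-- ===== PORT A =====
-- A's mutable Dir tree is represented by its canonical encoding: a dict keyed by the
-- directory's path (list of names from the root), holding (children_files, children_dirs);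
-- `all_dirs` is the list of paths in creation order, the root being [].
abbrev FsA := PySem.Dict (List String) (List (String × Int) × List String)

def fsGetA (fs : FsA) (p : List String) : List (String × Int) × List String :=
  fs.getD p ([], [])

-- body of the inner `ls`-output loop of parse_filesystem: one listed item
def itemStepA (cur : List String) (l : String) (fs : FsA) (ad : List (List String)) :
    FsA × List (List String) :=
  match PySem.Str.split₀ l with
  | t0 :: t1 :: _ =>
    if PySem.Str.strIsdigit t0 then
      if (fsGetA fs cur).1.any (fun f => f.1 == t1) then (fs, ad)
      else
        let d := fsGetA fs cur
        (fs.insert cur (d.1 ++ [(t1, (PySem.Int.ofStr? t0).getD 0)], d.2), ad)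
    else
      if (fsGetA fs cur).2.any (fun x => x == t1) then (fs, ad)
      else
        let d := fsGetA fs cur
        (fs.insert cur (d.1, d.2 ++ [t1]), ad ++ [cur ++ [t1]])
  | _ => (fs, ad)     -- item[0]/item[1] would raise IndexError: outside Pre_

-- inner `while i < len(lines) and not lines[i].startswith("$")` loop of parse_filesystem
def lsLoopA (cur : List String) :
    List String → FsA → List (List String) → (List String × FsA × List (List String))
  | [], fs, ad => ([], fs, ad)
  | l :: rest, fs, ad =>
    if PySem.Str.startswith l "$" then (l :: rest, fs, ad)
    else lsLoopA cur rest (itemStepA cur l fs ad).1 (itemStepA cur l fs ad).2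

-- needed by parseA's termination proof
theorem lsLoopA_length_le (cur : List String) :
    ∀ (l : List String) (fs : FsA) (ad : List (List String)),
      (lsLoopA cur l fs ad).1.length ≤ l.length := by
  intro l
  induction l with
  | nil => intro fs ad; simp [lsLoopA]
  | cons x t ih =>
    intro fs ad
    simp only [lsLoopA]
    split
    · simp
    · exact le_trans (ih _ _) (by simp)

-- outer `while i < len(lines)` loop of parse_filesystem
set_option maxHeartbeats 1000000 in
def parseA : List String → List String → FsA → List (List String) → (FsA × List (List String))
  | [], _, fs, ad => (fs, ad)
  | line :: rest, cur, fs, ad =>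
    if PySem.Str.startswith line "$" then
      match PySem.Str.split₀ (PySem.Str.slice line (some 2) none) with
      | [] => parseA rest cur fs ad          -- cmd_parts[0] would raise IndexError: outside Pre_
      | cmd :: args =>
        if cmd == "ls" then
          let r := lsLoopA cur rest fs ad
          parseA r.1 cur r.2.1 r.2.2
        else if cmd == "cd" then
          match args with
          | [] => parseA rest cur fs ad      -- cmd_parts[1] would raise IndexError: outside Pre_
          | t :: _ =>
            if t == "/" then parseA rest [] fs ad
            else if t == ".." then parseA rest cur.dropLast fs ad
            else if (fsGetA fs cur).2.any (fun x => x == t) then parseA rest (cur ++ [t]) fs ad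
            else parseA rest cur fs ad       -- next(...) would raise StopIteration: outside Pre_
        else parseA rest cur fs ad
    else parseA rest cur fs ad
termination_by l => l.length
decreasing_by
  all_goals simp_wf
  all_goals exact lsLoopA_length_le cur rest fs ad

-- compute_directory_size; the recursion over the (finite, acyclic) tree is expressed with
-- fuel, part_2 passes fuel sufficient for every directory reachable from the parse
def sizeA (fs : FsA) : Nat → List String → Int
  | 0, _ => 0
  | f + 1, p =>
    (fsGetA fs p).2.foldl (fun acc x => acc + sizeA fs f (p ++ [x]))
      (((fsGetA fs p).1.map (fun fl => fl.2)).sum)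

def part_2 (lines : List String) : Int :=
  let r := parseA lines [] PySem.Dict.empty [[]]
  let fs := r.1
  let ad := r.2
  let fuel := ad.length
  let used := sizeA fs fuel []
  let free := 70000000 - used
  let missing := 30000000 - free
  let valid := ad.filter (fun d => decide (missing ≤ sizeA fs fuel d))
  match PySem.List.min? valid (fun d => sizeA fs fuel d) with
  | some d => sizeA fs fuel d
  | none => 0        -- min of an empty list; unreachable: the root always qualifies

-- ===== PORT B =====
-- state: (files : path → {name: size}, known : dict of dir paths, cur, listing)
abbrev StB := PySem.Dict (List String) (PySem.Dict String Int) ×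
  PySem.Dict (List String) Bool × List String × Bool

def stepB (st : StB) (line : String) : StB :=
  let files := st.1
  let known := st.2.1
  let cur := st.2.2.1
  let listing := st.2.2.2
  if PySem.Str.startswith line "$" then
    match PySem.Str.split₀ (PySem.Str.slice line (some 2) none) with
    | [] => (files, known, cur, false)       -- parts[0] would raise IndexError: outside Pre_
    | t0 :: tl =>
      if t0 == "ls" then (files, known, cur, true)
      else if t0 == "cd" then
        match tl with
        | [] => (files, known, cur, false)   -- parts[1] would raise IndexError: outside Pre_
        | t :: _ =>
          if t == "/" then (files, known, [], false)
          else if t == ".." then (files, known, cur.dropLast, false)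
          else (files, known, cur ++ [t], false)
      else (files, known, cur, false)
  else if listing then
    match PySem.Str.split₀ line with
    | t0 :: t1 :: _ =>
      if PySem.Str.strIsdigit t0 then
        let m := files.getD cur PySem.Dict.empty
        (files.insert cur (m.setdefault t1 ((PySem.Int.ofStr? t0).getD 0)), known, cur, listing)
      else (files, known.setdefault (cur ++ [t1]) true, cur, listing)
    | _ => st                                -- tok[0]/tok[1] would raise IndexError: outside Pre_
  else st

-- `for k in range(len(q)+1): pref = q[:k]; if pref in totals: totals[pref] += s`
def rollupB (totals : PySem.Dict (List String) Int) (q : List String) (s : Int) :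
    PySem.Dict (List String) Int :=
  (PySem.List.pyRange 0 (PySem.List.len q + 1) 1).foldl
    (fun tot k =>
      let pref := PySem.List.slice q none (some k)
      if tot.contains pref then tot.modify pref 0 (fun v => v + s) else tot)
    totals

def part_2_alt (lines : List String) : Int :=
  let st := lines.foldl stepB
    (PySem.Dict.empty, PySem.Dict.mk [([], true)], [], false)
  let files := st.1
  let known := st.2.1
  let totals0 : PySem.Dict (List String) Int := PySem.Dict.ofList (known.keys.map (fun p => (p, 0)))
  let totals := files.items.foldl
    (fun tot qm => rollupB tot qm.1 (PySem.Dict.values qm.2).sum) totals0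
  let missing := totals.getD [] 0 - 40000000
  match PySem.List.min? ((PySem.Dict.values totals).filter (fun s => decide (missing ≤ s)))
      (fun v => v) with
  | some v => v
  | none => 0        -- min of an empty list; unreachable: the root's total always qualifies

-- ===== PRECONDITION & SPEC =====
-- A raises (IndexError / StopIteration) exactly when the session is malformed: a command line
-- "$ …" with no command word, a `cd` with no argument, an `ls` output line with fewer than
-- two words, or a `cd` naming a directory not listed earlier under the current directory.
-- Pre_part_2 is the line-by-line well-formedness of the session (the input format itself):
-- a reader checks each line's shape against the set of directory paths listed so far —
-- no part of A's computation (sizes, dedup state, answers) is re-run here.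
def validPre : List String → List String → List (List String) → Bool → Bool
  | [], _, _, _ => true
  | line :: rest, cur, known, listing =>
    if PySem.Str.startswith line "$" then
      match PySem.Str.split₀ (PySem.Str.slice line (some 2) none) with
      | [] => false
      | t0 :: tl =>
        if t0 == "ls" then validPre rest cur known true
        else if t0 == "cd" then
          match tl with
          | [] => false
          | t :: _ =>
            if t == "/" then validPre rest [] known false
            else if t == ".." then validPre rest cur.dropLast known false
            else if (cur ++ [t]) ∈ known then validPre rest (cur ++ [t]) known false
            else false
        else validPre rest cur known false
    else if listing then
      match PySem.Str.split₀ line with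
      | t0 :: t1 :: _ =>
        if PySem.Str.strIsdigit t0 then validPre rest cur known listing
        else
          validPre rest cur
            (if (cur ++ [t1]) ∈ known then known else known ++ [cur ++ [t1]]) listing
      | _ => false
    else validPre rest cur known listing

def Pre_part_2 (lines : List String) : Prop := validPre lines [] [[]] false = true
instance (lines : List String) : Decidable (Pre_part_2 lines) := by
  unfold Pre_part_2; infer_instance

def pvWitness_part_2 : List String :=
  ["$ cd /", "$ ls", "dir a", "100 b.txt", "$ cd a", "$ ls", "200 c.txt"]

def Spec_part_2 (lines : List String) (out : Int) : Prop := out = part_2_alt lines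
instance (lines : List String) (out : Int) : Decidable (Spec_part_2 lines out) := by
  unfold Spec_part_2; infer_instance

-- ===== CLAIM (what is proved, stated in full; the proofs are below) =====
def Claim_equal_part_2 : Prop :=
  ∀ (lines : List String), Dom_part_2 lines → Pre_part_2 lines → Spec_part_2 lines (part_2 lines)

-- ===== LEMMAS AND PROOFS =====

-- ---- proof device: A's two nested parsing loops re-expressed as a single flag-driven fold
-- (stepC keeps A's exact state and per-line actions; only the control flow is flattened)
abbrev StC := FsA × List (List String) × List String × Bool

def stepC (st : StC) (line : String) : StC :=
  let fs := st.1
  let ad := st.2.1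
  let cur := st.2.2.1
  let listing := st.2.2.2
  if PySem.Str.startswith line "$" then
    match PySem.Str.split₀ (PySem.Str.slice line (some 2) none) with
    | [] => (fs, ad, cur, false)
    | cmd :: args =>
      if cmd == "ls" then (fs, ad, cur, true)
      else if cmd == "cd" then
        match args with
        | [] => (fs, ad, cur, false)
        | t :: _ =>
          if t == "/" then (fs, ad, [], false)
          else if t == ".." then (fs, ad, cur.dropLast, false)
          else if (fsGetA fs cur).2.any (fun x => x == t) then (fs, ad, cur ++ [t], false)
          else (fs, ad, cur, false)
      else (fs, ad, cur, false)
  else if listing then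
    ((itemStepA cur line fs ad).1, (itemStepA cur line fs ad).2, cur, listing)
  else st

theorem lsLoopA_head (cur : List String) :
    ∀ (l : List String) (fs : FsA) (ad : List (List String)),
      (lsLoopA cur l fs ad).1 = [] ∨
        ∃ h t, (lsLoopA cur l fs ad).1 = h :: t ∧ PySem.Str.startswith h "$" = true := by
  intro l
  induction l with
  | nil => intro fs ad; left; simp [lsLoopA]
  | cons x t ih =>
    intro fs ad
    simp only [lsLoopA]
    split
    · exact Or.inr ⟨x, t, rfl, by assumption⟩
    · exact ih _ _

theorem lsLoop_foldC (cur : List String) :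
    ∀ (l : List String) (fs : FsA) (ad : List (List String)),
      List.foldl stepC (fs, ad, cur, true) l =
        List.foldl stepC ((lsLoopA cur l fs ad).2.1, (lsLoopA cur l fs ad).2.2, cur, true)
          (lsLoopA cur l fs ad).1 := by
  intro l
  induction l with
  | nil => intro fs ad; simp [lsLoopA]
  | cons x t ih =>
    intro fs ad
    by_cases hd : PySem.Str.startswith x "$" = true
    · have hr : lsLoopA cur (x :: t) fs ad = (x :: t, fs, ad) := by
        simp only [lsLoopA]; rw [if_pos hd]
      rw [hr]
    · have h1 : lsLoopA cur (x :: t) fs ad =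
          lsLoopA cur t (itemStepA cur x fs ad).1 (itemStepA cur x fs ad).2 := by
        simp only [lsLoopA]; rw [if_neg hd]
      have h2 : stepC (fs, ad, cur, true) x =
          ((itemStepA cur x fs ad).1, (itemStepA cur x fs ad).2, cur, true) := by
        unfold stepC; rw [if_neg hd]; rfl
      rw [List.foldl_cons, h1, h2]; exact ih _ _

theorem foldC_flag_irrel (fs : FsA) (ad : List (List String)) (cur : List String)
    (l : List String)
    (h : l = [] ∨ ∃ hd t, l = hd :: t ∧ PySem.Str.startswith hd "$" = true) :
    ((List.foldl stepC (fs, ad, cur, true) l).1, (List.foldl stepC (fs, ad, cur, true) l).2.1) =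
      ((List.foldl stepC (fs, ad, cur, false) l).1,
       (List.foldl stepC (fs, ad, cur, false) l).2.1) := by
  rcases h with rfl | ⟨hd0, t0, rfl, hs⟩
  · rfl
  · simp only [List.foldl_cons]
    have h2 : stepC (fs, ad, cur, true) hd0 = stepC (fs, ad, cur, false) hd0 := by
      unfold stepC; rw [if_pos hs, if_pos hs]
    rw [h2]

theorem parseA_eq_foldC :
    ∀ (n : Nat) (l : List String), l.length ≤ n → ∀ (cur : List String) (fs : FsA)
      (ad : List (List String)),
      parseA l cur fs ad =
        ((List.foldl stepC (fs, ad, cur, false) l).1,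
         (List.foldl stepC (fs, ad, cur, false) l).2.1) := by
  intro n
  induction n with
  | zero =>
    intro l hl cur fs ad
    have : l = [] := List.length_eq_zero_iff.mp (Nat.le_zero.mp hl)
    subst this; simp [parseA]
  | succ n ihn =>
    intro l hl cur fs ad
    match l with
    | [] => simp [parseA]
    | line :: rest =>
      have hrl : rest.length ≤ n := by simpa using hl
      by_cases hd : PySem.Str.startswith line "$" = true
      · rcases h : PySem.Str.split₀ (PySem.Str.slice line (some 2) none) with _ | ⟨cmd, args⟩
        · have hA : parseA (line :: rest) cur fs ad = parseA rest cur fs ad := by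
            rw [parseA, if_pos hd, h]
          have hC : stepC (fs, ad, cur, false) line = (fs, ad, cur, false) := by
            unfold stepC; rw [if_pos hd, h]
          rw [hA, List.foldl_cons, hC]; exact ihn rest hrl cur fs ad
        · by_cases hls : cmd = "ls"
          · have hA : parseA (line :: rest) cur fs ad =
                parseA (lsLoopA cur rest fs ad).1 cur (lsLoopA cur rest fs ad).2.1
                  (lsLoopA cur rest fs ad).2.2 := by
              rw [parseA, if_pos hd, h]; simp [hls]
            have hC : stepC (fs, ad, cur, false) line = (fs, ad, cur, true) := by
              unfold stepC; rw [if_pos hd, h]; simp [hls]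
            rw [hA, List.foldl_cons, hC, lsLoop_foldC,
              foldC_flag_irrel _ _ _ _ (lsLoopA_head cur rest fs ad)]
            exact ihn _ (le_trans (lsLoopA_length_le cur rest fs ad) hrl) cur _ _
          · by_cases hcd : cmd = "cd"
            · rcases args with _ | ⟨t, args'⟩
              · have hA : parseA (line :: rest) cur fs ad = parseA rest cur fs ad := by
                  rw [parseA, if_pos hd, h]; simp [hcd]
                have hC : stepC (fs, ad, cur, false) line = (fs, ad, cur, false) := by
                  unfold stepC; rw [if_pos hd, h]; simp [hcd]
                rw [hA, List.foldl_cons, hC]; exact ihn rest hrl cur fs ad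
              · by_cases h1 : t = "/"
                · have hA : parseA (line :: rest) cur fs ad = parseA rest [] fs ad := by
                    rw [parseA, if_pos hd, h]; simp [hcd, h1]
                  have hC : stepC (fs, ad, cur, false) line = (fs, ad, [], false) := by
                    unfold stepC; rw [if_pos hd, h]; simp [hcd, h1]
                  rw [hA, List.foldl_cons, hC]; exact ihn rest hrl [] fs ad
                · by_cases h2 : t = ".."
                  · have hA : parseA (line :: rest) cur fs ad = parseA rest cur.dropLast fs ad := by
                      rw [parseA, if_pos hd, h]; simp [hcd, h2]
                    have hC : stepC (fs, ad, cur, false) line = (fs, ad, cur.dropLast, false) := by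
                      unfold stepC; rw [if_pos hd, h]; simp [hcd, h2]
                    rw [hA, List.foldl_cons, hC]; exact ihn rest hrl _ fs ad
                  · by_cases h3 : t ∈ (fsGetA fs cur).2
                    · have hA : parseA (line :: rest) cur fs ad = parseA rest (cur ++ [t]) fs ad := by
                        rw [parseA, if_pos hd, h]
                        simp [hcd, h1, h2, h3]
                      have hC : stepC (fs, ad, cur, false) line = (fs, ad, cur ++ [t], false) := by
                        unfold stepC
                        rw [if_pos hd, h]; simp [hcd, h1, h2, h3]
                      rw [hA, List.foldl_cons, hC]; exact ihn rest hrl _ fs ad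
                    · have hA : parseA (line :: rest) cur fs ad = parseA rest cur fs ad := by
                        rw [parseA, if_pos hd, h]
                        simp [hcd, h1, h2, h3]
                      have hC : stepC (fs, ad, cur, false) line = (fs, ad, cur, false) := by
                        unfold stepC
                        rw [if_pos hd, h]; simp [hcd, h1, h2, h3]
                      rw [hA, List.foldl_cons, hC]; exact ihn rest hrl cur fs ad
            · have hA : parseA (line :: rest) cur fs ad = parseA rest cur fs ad := by
                rw [parseA, if_pos hd, h]; simp [hls, hcd]
              have hC : stepC (fs, ad, cur, false) line = (fs, ad, cur, false) := by
                unfold stepC; rw [if_pos hd, h]; simp [hls, hcd]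
              rw [hA, List.foldl_cons, hC]; exact ihn rest hrl cur fs ad
      · have hA : parseA (line :: rest) cur fs ad = parseA rest cur fs ad := by
          rw [parseA]; rw [if_neg hd]
        have hC : stepC (fs, ad, cur, false) line = (fs, ad, cur, false) := by
          unfold stepC; rw [if_neg hd]; rfl
        rw [hA, List.foldl_cons, hC]; exact ihn rest hrl cur fs ad

-- ---- the simulation invariant between A's parse state and B's parse state
structure PInv (fs : FsA) (ad : List (List String))
    (fB : PySem.Dict (List String) (PySem.Dict String Int))
    (kB : PySem.Dict (List String) Bool) (cur : List String) : Prop where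
  known_eq : kB.items = ad.map (fun p => (p, true))
  files_rel : ∀ q, (fsGetA fs q).1 = (fB.getD q PySem.Dict.empty).items
  fkeys_sub : ∀ qm ∈ fB.items, qm.1 ∈ ad
  fkeys_nodup : fB.keys.Nodup
  ch : ∀ q x, x ∈ (fsGetA fs q).2 ↔ q ++ [x] ∈ ad
  ch_nodup : ∀ q, (fsGetA fs q).2.Nodup
  ad_nodup : ad.Nodup
  pc : ∀ q ∈ ad, ∀ k : Nat, q.take k ∈ ad
  cur_mem : cur ∈ ad

-- membership form of the Bool dedup tests
theorem any_beq_mem (l : List String) (t : String) :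
    (l.any (fun x => x == t)) = true ↔ t ∈ l := by
  simp [List.any_eq_true, beq_iff_eq]

theorem kB_contains (kB : PySem.Dict (List String) Bool) (ad : List (List String))
    (hk : kB.items = ad.map (fun p => (p, true))) (q : List String) :
    kB.contains q = true ↔ q ∈ ad := by
  simp [PySem.Dict.contains, hk, List.any_eq_true, beq_iff_eq]

theorem fsGetA_insert_self (fs : FsA) (p : List String)
    (v : List (String × Int) × List String) : fsGetA (fs.insert p v) p = v := by
  simp [fsGetA, PySem.Dict.getD_insert_self]

theorem fsGetA_insert_ne (fs : FsA) (p q : List String)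
    (v : List (String × Int) × List String) (h : q ≠ p) :
    fsGetA (fs.insert p v) q = fsGetA fs q := by
  simp [fsGetA, PySem.Dict.getD_insert_of_ne _ _ _ h]

-- PInv is preserved when only `cur` moves to another directory of the tree
theorem PInv.withCur {fs : FsA} {ad : List (List String)}
    {fB : PySem.Dict (List String) (PySem.Dict String Int)}
    {kB : PySem.Dict (List String) Bool} {cur cur' : List String}
    (hI : PInv fs ad fB kB cur) (h : cur' ∈ ad) : PInv fs ad fB kB cur' :=
  ⟨hI.known_eq, hI.files_rel, hI.fkeys_sub, hI.fkeys_nodup, hI.ch, hI.ch_nodup,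
    hI.ad_nodup, hI.pc, h⟩

-- PInv preservation for a listed file entry
theorem PInv.fileStep {fs : FsA} {ad : List (List String)}
    {fB : PySem.Dict (List String) (PySem.Dict String Int)}
    {kB : PySem.Dict (List String) Bool} {cur : List String}
    (hI : PInv fs ad fB kB cur) (t1 : String) (sz : Int) :
    PInv (if (fsGetA fs cur).1.any (fun f => f.1 == t1) then fs
          else fs.insert cur ((fsGetA fs cur).1 ++ [(t1, sz)], (fsGetA fs cur).2)) ad
      (fB.insert cur ((fB.getD cur PySem.Dict.empty).setdefault t1 sz)) kB cur := by
  have hmB : (fB.getD cur PySem.Dict.empty).items = (fsGetA fs cur).1 := (hI.files_rel cur).symm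
  have hcontains : (fB.getD cur PySem.Dict.empty).contains t1 =
      (fsGetA fs cur).1.any (fun f => f.1 == t1) := by
    simp [PySem.Dict.contains, hmB]
  have hget2 : ∀ q,
      (fsGetA (if (fsGetA fs cur).1.any (fun f => f.1 == t1) then fs
          else fs.insert cur ((fsGetA fs cur).1 ++ [(t1, sz)], (fsGetA fs cur).2)) q).2 =
        (fsGetA fs q).2 := by
    intro q
    split
    · rfl
    · by_cases hq : q = cur
      · rw [hq, fsGetA_insert_self]
      · rw [fsGetA_insert_ne _ _ _ _ hq]
  refine ⟨hI.known_eq, ?_, ?_, ?_, fun q x => (hget2 q ▸ hI.ch q x),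
    fun q => (hget2 q ▸ hI.ch_nodup q), hI.ad_nodup, hI.pc, hI.cur_mem⟩
  · intro q
    by_cases hq : q = cur
    · rw [hq, PySem.Dict.getD_insert_self]
      by_cases hc : ((fsGetA fs cur).1.any (fun f => f.1 == t1)) = true
      · rw [if_pos hc]
        simp only [PySem.Dict.setdefault, hcontains, hc, if_true]
        exact hI.files_rel cur
      · rw [if_neg hc, fsGetA_insert_self]
        have hf : (fB.getD cur PySem.Dict.empty).contains t1 = false := by
          rcases h2 : (fB.getD cur PySem.Dict.empty).contains t1 with _ | _
          · rfl
          · rw [hcontains] at h2; exact absurd h2 hc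
        simp only [PySem.Dict.setdefault, hf]
        simp [hmB]
    · rw [PySem.Dict.getD_insert_of_ne _ _ _ hq]
      split
      · exact hI.files_rel q
      · rw [fsGetA_insert_ne _ _ _ _ hq]; exact hI.files_rel q
  · intro qm hqm
    have hk : qm.1 ∈ (fB.insert cur ((fB.getD cur PySem.Dict.empty).setdefault t1 sz)).keys :=
      List.mem_map_of_mem hqm
    rcases (PySem.Dict.mem_keys_insert _ _ _ _).mp hk with h | h
    · rw [h]; exact hI.cur_mem
    · rcases List.mem_map.mp h with ⟨qm', hqm', hfst⟩
      rw [← hfst]; exact hI.fkeys_sub qm' hqm'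
  · exact PySem.Dict.nodup_keys_insert _ _ _ hI.fkeys_nodup

-- PInv preservation for a listed sub-directory entry
theorem PInv.dirStep {fs : FsA} {ad : List (List String)}
    {fB : PySem.Dict (List String) (PySem.Dict String Int)}
    {kB : PySem.Dict (List String) Bool} {cur : List String}
    (hI : PInv fs ad fB kB cur) (t1 : String) :
    PInv (if (fsGetA fs cur).2.any (fun x => x == t1) then fs
          else fs.insert cur ((fsGetA fs cur).1, (fsGetA fs cur).2 ++ [t1]))
      (if (fsGetA fs cur).2.any (fun x => x == t1) then ad else ad ++ [cur ++ [t1]])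
      fB (kB.setdefault (cur ++ [t1]) true) cur := by
  by_cases hc : ((fsGetA fs cur).2.any (fun x => x == t1)) = true
  · rw [if_pos hc, if_pos hc]
    have hmem : (cur ++ [t1]) ∈ ad := (hI.ch cur t1).mp (any_beq_mem _ _ |>.mp hc)
    have hk : kB.contains (cur ++ [t1]) = true := (kB_contains kB ad hI.known_eq _).mpr hmem
    simp only [PySem.Dict.setdefault, hk, if_true]
    exact hI
  · rw [if_neg hc, if_neg hc]
    have hnmem : (cur ++ [t1]) ∉ ad := fun hmem =>
      hc (any_beq_mem _ _ |>.mpr ((hI.ch cur t1).mpr hmem))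
    have hkc : kB.contains (cur ++ [t1]) = false := by
      rcases h : kB.contains (cur ++ [t1]) with _ | _
      · rfl
      · exact absurd ((kB_contains kB ad hI.known_eq _).mp h) hnmem
    have hkB' : (kB.setdefault (cur ++ [t1]) true).items =
        (ad ++ [cur ++ [t1]]).map (fun p => (p, true)) := by
      simp only [PySem.Dict.setdefault, hkc]
      simp [hI.known_eq]
    have hget1 : ∀ q, (fsGetA (fs.insert cur ((fsGetA fs cur).1, (fsGetA fs cur).2 ++ [t1])) q).1 =
        (fsGetA fs q).1 := by
      intro q
      by_cases hq : q = cur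
      · rw [hq, fsGetA_insert_self]
      · rw [fsGetA_insert_ne _ _ _ _ hq]
    refine ⟨hkB', ?_, ?_, hI.fkeys_nodup, ?_, ?_, ?_, ?_, List.mem_append_left _ hI.cur_mem⟩
    · intro q; rw [hget1 q]; exact hI.files_rel q
    · intro qm hqm; exact List.mem_append_left _ (hI.fkeys_sub qm hqm)
    · intro q x
      by_cases hq : q = cur
      · rw [hq, fsGetA_insert_self]
        simp only [List.mem_append, List.mem_singleton]
        constructor
        · rintro (hx | rfl)
          · exact Or.inl ((hI.ch cur x).mp hx)
          · exact Or.inr rfl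
        · rintro (hx | hx)
          · exact Or.inl ((hI.ch cur x).mpr hx)
          · exact Or.inr (by simpa using hx)
      · rw [fsGetA_insert_ne _ _ _ _ hq]
        simp only [List.mem_append, List.mem_singleton]
        constructor
        · intro hx; exact Or.inl ((hI.ch q x).mp hx)
        · rintro (hx | hx)
          · exact (hI.ch q x).mpr hx
          · exact absurd
              (List.concat_inj.mp (by simpa [List.concat_eq_append] using hx)).1 hq
    · intro q
      by_cases hq : q = cur
      · rw [hq, fsGetA_insert_self]
        refine List.Nodup.append (hI.ch_nodup cur) (List.nodup_singleton t1) ?_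
        intro x hx hx1
        rw [List.mem_singleton] at hx1
        subst hx1
        exact hc (any_beq_mem _ _ |>.mpr hx)
      · rw [fsGetA_insert_ne _ _ _ _ hq]; exact hI.ch_nodup q
    · rw [List.nodup_append]
      refine ⟨hI.ad_nodup, List.nodup_singleton _, ?_⟩
      intro a ha b hb
      rw [List.mem_singleton] at hb
      subst hb
      intro heq
      exact hnmem (heq ▸ ha)
    · intro q hq k
      rcases List.mem_append.mp hq with hq' | hq'
      · exact List.mem_append_left _ (hI.pc q hq' k)
      · rw [List.mem_singleton] at hq'
        subst hq'
        by_cases hk : k ≤ cur.length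
        · rw [List.take_append_of_le_length hk]
          exact List.mem_append_left _ (hI.pc cur hI.cur_mem k)
        · have ht : (cur ++ [t1]).take k = cur ++ [t1] := by
            apply List.take_of_length_le
            simp; omega
          rw [ht]
          exact List.mem_append_right _ (by simp)

theorem itemStepA_eq (cur : List String) (l : String) (fs : FsA) (ad : List (List String))
    (t0 t1 : String) (r : List String) (h : PySem.Str.split₀ l = t0 :: t1 :: r) :
    itemStepA cur l fs ad =
      (if PySem.Str.strIsdigit t0 then
        if (fsGetA fs cur).1.any (fun f => f.1 == t1) then (fs, ad)
        else (fs.insert cur ((fsGetA fs cur).1 ++ [(t1, (PySem.Int.ofStr? t0).getD 0)],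
          (fsGetA fs cur).2), ad)
      else
        if (fsGetA fs cur).2.any (fun x => x == t1) then (fs, ad)
        else (fs.insert cur ((fsGetA fs cur).1, (fsGetA fs cur).2 ++ [t1]),
          ad ++ [cur ++ [t1]])) := by
  unfold itemStepA; rw [h]

theorem simCB :
    ∀ (l : List String) (fs : FsA) (ad : List (List String)) (cur : List String)
      (fB : PySem.Dict (List String) (PySem.Dict String Int))
      (kB : PySem.Dict (List String) Bool) (flag : Bool),
      PInv fs ad fB kB cur →
      validPre l cur ad flag = true →
      PInv (List.foldl stepC (fs, ad, cur, flag) l).1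
          (List.foldl stepC (fs, ad, cur, flag) l).2.1
          (List.foldl stepB (fB, kB, cur, flag) l).1
          (List.foldl stepB (fB, kB, cur, flag) l).2.1
          (List.foldl stepC (fs, ad, cur, flag) l).2.2.1 ∧
        (List.foldl stepB (fB, kB, cur, flag) l).2.2 =
          (List.foldl stepC (fs, ad, cur, flag) l).2.2 := by
  intro l
  induction l with
  | nil => intro fs ad cur fB kB flag hI hv; exact ⟨hI, rfl⟩
  | cons line rest ih =>
    intro fs ad cur fB kB flag hI hv
    by_cases hd : PySem.Str.startswith line "$" = true
    · rcases h : PySem.Str.split₀ (PySem.Str.slice line (some 2) none) with _ | ⟨cmd, args⟩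
      · rw [validPre] at hv; rw [if_pos hd, h] at hv; simp at hv
      · by_cases hls : cmd = "ls"
        · have hC : stepC (fs, ad, cur, flag) line = (fs, ad, cur, true) := by
            unfold stepC; rw [if_pos hd, h]; simp [hls]
          have hB : stepB (fB, kB, cur, flag) line = (fB, kB, cur, true) := by
            unfold stepB; rw [if_pos hd, h]; simp [hls]
          have hv' : validPre rest cur ad true = true := by
            rw [validPre] at hv; rw [if_pos hd, h] at hv; simpa [hls] using hv
          rw [List.foldl_cons, List.foldl_cons, hC, hB]
          exact ih fs ad cur fB kB true hI hv'
        · by_cases hcd : cmd = "cd"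
          · rcases args with _ | ⟨t, args'⟩
            · rw [validPre] at hv; rw [if_pos hd, h] at hv; simp [hcd] at hv
            · by_cases h1 : t = "/"
              · have hC : stepC (fs, ad, cur, flag) line = (fs, ad, [], false) := by
                  unfold stepC; rw [if_pos hd, h]; simp [hcd, h1]
                have hB : stepB (fB, kB, cur, flag) line = (fB, kB, [], false) := by
                  unfold stepB; rw [if_pos hd, h]; simp [hcd, h1]
                have hv' : validPre rest [] ad false = true := by
                  rw [validPre] at hv; rw [if_pos hd, h] at hv; simpa [hls, hcd, h1] using hv
                rw [List.foldl_cons, List.foldl_cons, hC, hB]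
                have hrootmem : ([] : List String) ∈ ad := by
                  have := hI.pc cur hI.cur_mem 0
                  simpa using this
                exact ih fs ad [] fB kB false (hI.withCur hrootmem) hv'
              · by_cases h2 : t = ".."
                · have hC : stepC (fs, ad, cur, flag) line = (fs, ad, cur.dropLast, false) := by
                    unfold stepC; rw [if_pos hd, h]; simp [hcd, h2]
                  have hB : stepB (fB, kB, cur, flag) line = (fB, kB, cur.dropLast, false) := by
                    unfold stepB; rw [if_pos hd, h]; simp [hcd, h2]
                  have hv' : validPre rest cur.dropLast ad false = true := by
                    rw [validPre] at hv; rw [if_pos hd, h] at hv; simpa [hcd, h2] using hv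
                  rw [List.foldl_cons, List.foldl_cons, hC, hB]
                  have hmem : cur.dropLast ∈ ad := by
                    rw [List.dropLast_eq_take]
                    exact hI.pc cur hI.cur_mem _
                  exact ih fs ad cur.dropLast fB kB false (hI.withCur hmem) hv'
                · by_cases hmem : (cur ++ [t]) ∈ ad
                  · have hany : ((fsGetA fs cur).2.any (fun x => x == t)) = true :=
                      (any_beq_mem _ _).mpr ((hI.ch cur t).mpr hmem)
                    have hC : stepC (fs, ad, cur, flag) line = (fs, ad, cur ++ [t], false) := by
                      unfold stepC; rw [if_pos hd, h]; simp [hcd, h1, h2, hany]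
                    have hB : stepB (fB, kB, cur, flag) line = (fB, kB, cur ++ [t], false) := by
                      unfold stepB; rw [if_pos hd, h]; simp [hcd, h1, h2]
                    have hv' : validPre rest (cur ++ [t]) ad false = true := by
                      rw [validPre] at hv; rw [if_pos hd, h] at hv
                      simpa [hcd, h1, h2, hmem] using hv
                    rw [List.foldl_cons, List.foldl_cons, hC, hB]
                    exact ih fs ad (cur ++ [t]) fB kB false (hI.withCur hmem) hv'
                  · exfalso
                    rw [validPre] at hv; rw [if_pos hd, h] at hv
                    simp [hcd, h1, h2, hmem] at hv
          · have hC : stepC (fs, ad, cur, flag) line = (fs, ad, cur, false) := by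
              unfold stepC; rw [if_pos hd, h]; simp [hls, hcd]
            have hB : stepB (fB, kB, cur, flag) line = (fB, kB, cur, false) := by
              unfold stepB; rw [if_pos hd, h]; simp [hls, hcd]
            have hv' : validPre rest cur ad false = true := by
              rw [validPre] at hv; rw [if_pos hd, h] at hv; simpa [hls, hcd] using hv
            rw [List.foldl_cons, List.foldl_cons, hC, hB]
            exact ih fs ad cur fB kB false hI hv'
    · rcases flag with _ | _
      · have hC : stepC (fs, ad, cur, false) line = (fs, ad, cur, false) := by
          unfold stepC; rw [if_neg hd]; rfl
        have hB : stepB (fB, kB, cur, false) line = (fB, kB, cur, false) := by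
          unfold stepB; rw [if_neg hd]; rfl
        have hv' : validPre rest cur ad false = true := by
          rw [validPre] at hv; rw [if_neg hd] at hv; simpa using hv
        rw [List.foldl_cons, List.foldl_cons, hC, hB]
        exact ih fs ad cur fB kB false hI hv'
      · rcases h : PySem.Str.split₀ line with _ | ⟨t0, _ | ⟨t1, r2⟩⟩
        · rw [validPre] at hv; rw [if_neg hd] at hv; rw [h] at hv; simp at hv
        · rw [validPre] at hv; rw [if_neg hd] at hv; rw [h] at hv; simp at hv
        · have hC : stepC (fs, ad, cur, true) line =
              ((itemStepA cur line fs ad).1, (itemStepA cur line fs ad).2, cur, true) := by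
            unfold stepC; rw [if_neg hd]; rfl
          have hBi : stepB (fB, kB, cur, true) line =
              (if PySem.Str.strIsdigit t0 then
                (fB.insert cur ((fB.getD cur PySem.Dict.empty).setdefault t1
                  ((PySem.Int.ofStr? t0).getD 0)), kB, cur, true)
              else (fB, kB.setdefault (cur ++ [t1]) true, cur, true)) := by
            unfold stepB; rw [if_neg hd, h]; rfl
          by_cases hdg : PySem.Str.strIsdigit t0 = true
          · have hdgC : PySem.Chars.strIsdigit t0.toList = true := by
              simpa [PySem.Str.strIsdigit] using hdg
            have hitem : itemStepA cur line fs ad =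
                (if (fsGetA fs cur).1.any (fun f => f.1 == t1) then fs
                 else fs.insert cur ((fsGetA fs cur).1 ++ [(t1, (PySem.Int.ofStr? t0).getD 0)],
                   (fsGetA fs cur).2), ad) := by
              rw [itemStepA_eq cur line fs ad t0 t1 r2 h, if_pos hdg]
              split <;> rfl
            rw [if_pos hdg] at hBi
            have hv' : validPre rest cur ad true = true := by
              rw [validPre] at hv; rw [if_neg hd] at hv; rw [h] at hv
              simpa [hdgC] using hv
            rw [List.foldl_cons, List.foldl_cons, hC, hBi, hitem]
            exact ih _ _ _ _ _ true (hI.fileStep t1 _) hv'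
          · have hdgC : PySem.Chars.strIsdigit t0.toList = false := by
              rcases hh : PySem.Chars.strIsdigit t0.toList with _ | _
              · rfl
              · exact absurd (by simpa [PySem.Str.strIsdigit] using hh) hdg
            have hitem : itemStepA cur line fs ad =
                (if (fsGetA fs cur).2.any (fun x => x == t1) then fs
                 else fs.insert cur ((fsGetA fs cur).1, (fsGetA fs cur).2 ++ [t1]),
                 if (fsGetA fs cur).2.any (fun x => x == t1) then ad
                 else ad ++ [cur ++ [t1]]) := by
              rw [itemStepA_eq cur line fs ad t0 t1 r2 h, if_neg hdg]
              split <;> rfl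
            rw [if_neg hdg] at hBi
            have hv' : validPre rest cur
                (if (cur ++ [t1]) ∈ ad then ad else ad ++ [cur ++ [t1]]) true = true := by
              rw [validPre] at hv; rw [if_neg hd] at hv; rw [h] at hv
              simpa [hdgC] using hv
            have hadif : (if (cur ++ [t1]) ∈ ad then ad else ad ++ [cur ++ [t1]]) =
                (if (fsGetA fs cur).2.any (fun x => x == t1) then ad
                 else ad ++ [cur ++ [t1]]) := by
              by_cases hmem : (cur ++ [t1]) ∈ ad
              · rw [if_pos hmem, if_pos ((any_beq_mem _ _).mpr ((hI.ch cur t1).mpr hmem))]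
              · rw [if_neg hmem]
                have : ¬ ((fsGetA fs cur).2.any (fun x => x == t1)) = true := fun hc =>
                  hmem ((hI.ch cur t1).mp ((any_beq_mem _ _).mp hc))
                rw [if_neg this]
            rw [hadif] at hv'
            rw [List.foldl_cons, List.foldl_cons, hC, hBi, hitem]
            exact ih _ _ _ _ _ true (hI.dirStep t1) hv'

-- ---- per-directory totals
def fsum (m : PySem.Dict String Int) : Int := (PySem.Dict.values m).sum

def Tf (fB : PySem.Dict (List String) (PySem.Dict String Int)) (p : List String) : Int :=
  (fB.items.map (fun qm => if p <+: qm.1 then fsum qm.2 else 0)).sum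

theorem getD_sum (fB : PySem.Dict (List String) (PySem.Dict String Int))
    (hnd : fB.keys.Nodup) (p : List String) :
    (fB.items.map (fun qm => if qm.1 = p then fsum qm.2 else 0)).sum =
      fsum (fB.getD p PySem.Dict.empty) := by
  rcases fB with ⟨l⟩
  simp only [PySem.Dict.getD, PySem.Dict.get?] at *
  induction l with
  | nil => simp [fsum, PySem.Dict.values, PySem.Dict.empty]
  | cons kv rest ih =>
    simp only [PySem.Dict.keys, List.map_cons, List.nodup_cons] at hnd
    by_cases hk : kv.1 = p
    · subst hk
      rw [List.map_cons, List.sum_cons, if_pos rfl]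
      have hrest : (rest.map (fun qm => if qm.1 = kv.1 then fsum qm.2 else 0)).sum = 0 := by
        apply List.sum_eq_zero
        intro x hx
        rcases List.mem_map.mp hx with ⟨qm, hqm, rfl⟩
        rw [if_neg]
        intro hq
        exact hnd.1 (hq ▸ List.mem_map_of_mem hqm)
      rw [hrest]
      simp [List.find?_cons_of_pos, fsum]
    · rw [List.map_cons, List.sum_cons, if_neg hk]
      have := ih hnd.2
      rw [List.find?_cons_of_neg] at *
      · simpa using this
      · simpa using hk

theorem sum_ite_single (c : List String) (hnd : c.Nodup) (P : String → Prop)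
    [DecidablePred P] (v : Int) (x0 : String) (hx0 : x0 ∈ c) (hPx0 : P x0)
    (huniq : ∀ x ∈ c, P x → x = x0) :
    (c.map (fun x => if P x then v else 0)).sum = v := by
  induction c with
  | nil => cases hx0
  | cons y t ih =>
    rw [List.map_cons, List.sum_cons]
    rw [List.nodup_cons] at hnd
    by_cases hy : y = x0
    · subst hy
      rw [if_pos hPx0]
      have hz : (t.map (fun x => if P x then v else 0)).sum = 0 := by
        apply List.sum_eq_zero
        intro z hz
        rcases List.mem_map.mp hz with ⟨x, hxt, rfl⟩
        rw [if_neg]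
        intro hPx
        exact hnd.1 (huniq x (List.mem_cons_of_mem _ hxt) hPx ▸ hxt)
      rw [hz, add_zero]
    · have hy' : ¬ P y := fun hPy => hy (huniq y List.mem_cons_self hPy)
      rw [if_neg hy', zero_add]
      rcases List.mem_cons.mp hx0 with rfl | hx0t
      · exact absurd rfl hy
      · exact ih hnd.2 hx0t (fun x hx hPx => huniq x (List.mem_cons_of_mem _ hx) hPx)

theorem sum_map_swap (items : List (List String × PySem.Dict String Int)) (c : List String)
    (g : List String × PySem.Dict String Int → String → Int) :
    (items.map (fun a => (c.map (fun b => g a b)).sum)).sum =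
      (c.map (fun b => (items.map (fun a => g a b)).sum)).sum := by
  induction items with
  | nil => simp
  | cons a t ih =>
    simp only [List.map_cons, List.sum_cons, ih]
    rw [← PySem.List.sum_map_add_int]

theorem T_decomp (fs : FsA) (ad : List (List String))
    (fB : PySem.Dict (List String) (PySem.Dict String Int))
    (kB : PySem.Dict (List String) Bool) (cur : List String)
    (hI : PInv fs ad fB kB cur) (p : List String) (_hp : p ∈ ad) :
    Tf fB p = fsum (fB.getD p PySem.Dict.empty) +
      ((fsGetA fs p).2.map (fun x => Tf fB (p ++ [x]))).sum := by
  have key : ∀ qm ∈ fB.items,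
      (if p <+: qm.1 then fsum qm.2 else 0) =
        (if qm.1 = p then fsum qm.2 else 0) +
          ((fsGetA fs p).2.map (fun x => if p ++ [x] <+: qm.1 then fsum qm.2 else 0)).sum := by
    intro qm hqm
    have hqad : qm.1 ∈ ad := hI.fkeys_sub qm hqm
    by_cases hpq : p <+: qm.1
    · by_cases hqp : qm.1 = p
      · rw [if_pos hpq, if_pos hqp]
        have hz : ((fsGetA fs p).2.map
            (fun x => if p ++ [x] <+: qm.1 then fsum qm.2 else 0)).sum = 0 := by
          apply List.sum_eq_zero
          intro z hz
          rcases List.mem_map.mp hz with ⟨x, _, rfl⟩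
          rw [if_neg]
          intro hpre
          have := hpre.length_le
          simp [hqp] at this
        rw [hz, add_zero]
      · rw [if_pos hpq, if_neg hqp]
        have hlt : p.length < qm.1.length := by
          rcases Nat.lt_or_ge p.length qm.1.length with h | h
          · exact h
          · exact absurd (hpq.eq_of_length (le_antisymm hpq.length_le h)).symm hqp
        have htake : qm.1.take (p.length + 1) = p ++ [qm.1[p.length]] := by
          rw [List.take_add_one, ← List.prefix_iff_eq_take.mp hpq]
          simp [List.getElem?_eq_getElem hlt]
        have hx0ad : p ++ [qm.1[p.length]] ∈ ad := by
          rw [← htake]; exact hI.pc qm.1 hqad _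
        have hx0c : qm.1[p.length] ∈ (fsGetA fs p).2 := (hI.ch p _).mpr hx0ad
        have hPx0 : p ++ [qm.1[p.length]] <+: qm.1 := by
          rw [← htake]; exact List.take_prefix _ _
        rw [sum_ite_single _ (hI.ch_nodup p) _ (fsum qm.2) _ hx0c hPx0 ?uniq, zero_add]
        case uniq =>
          intro x _ hPx
          have hxlen : (p ++ [x]).length = p.length + 1 := by simp
          have := List.prefix_iff_eq_take.mp hPx
          rw [hxlen, htake] at this
          simpa using this
    · rw [if_neg hpq, if_neg (fun hqp2 => hpq (by rw [hqp2]))]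
      have hz : ((fsGetA fs p).2.map
          (fun x => if p ++ [x] <+: qm.1 then fsum qm.2 else 0)).sum = 0 := by
        apply List.sum_eq_zero
        intro z hz
        rcases List.mem_map.mp hz with ⟨x, _, rfl⟩
        rw [if_neg]
        intro hpre
        exact hpq (((p.prefix_append [x]).trans hpre))
      rw [hz, add_zero]
  calc Tf fB p
      = (fB.items.map (fun qm =>
          (if qm.1 = p then fsum qm.2 else 0) +
            ((fsGetA fs p).2.map (fun x => if p ++ [x] <+: qm.1 then fsum qm.2 else 0)).sum)).sum := by
        unfold Tf
        exact congrArg List.sum (List.map_congr_left key)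
    _ = (fB.items.map (fun qm => if qm.1 = p then fsum qm.2 else 0)).sum +
        (fB.items.map (fun qm =>
          ((fsGetA fs p).2.map (fun x => if p ++ [x] <+: qm.1 then fsum qm.2 else 0)).sum)).sum := by
        rw [PySem.List.sum_map_add_int]
    _ = fsum (fB.getD p PySem.Dict.empty) +
        ((fsGetA fs p).2.map (fun x => Tf fB (p ++ [x]))).sum := by
        rw [getD_sum fB hI.fkeys_nodup p, sum_map_swap]
        rfl

theorem depth_bound (ad : List (List String)) (_hnd : ad.Nodup)
    (hpc : ∀ q ∈ ad, ∀ k : Nat, q.take k ∈ ad) (p q : List String)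
    (hq : q ∈ ad) (hpre : p <+: q) : q.length < p.length + ad.length := by
  classical
  set L : List (List String) :=
    (List.range (q.length - p.length + 1)).map (fun i => q.take (p.length + i)) with hL
  have hlen : L.length = q.length - p.length + 1 := by simp [hL]
  have hplen : p.length ≤ q.length := hpre.length_le
  have hnodupL : L.Nodup := by
    rw [hL]
    apply List.Nodup.map_on
    · intro a ha b hb hab
      simp only [List.mem_range] at ha hb
      have la : (q.take (p.length + a)).length = p.length + a := by
        rw [List.length_take]; omega
      have lb : (q.take (p.length + b)).length = p.length + b := by
        rw [List.length_take]; omega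
      have := congrArg List.length hab
      rw [la, lb] at this
      omega
    · exact List.nodup_range
  have hsubL : ∀ x ∈ L, x ∈ ad := by
    intro x hx
    rcases List.mem_map.mp hx with ⟨i, _, rfl⟩
    exact hpc q hq _
  have hcard : L.length ≤ ad.length := by
    calc L.length = L.toFinset.card := (List.toFinset_card_of_nodup hnodupL).symm
    _ ≤ ad.toFinset.card := Finset.card_le_card (fun x hx =>
        List.mem_toFinset.mpr (hsubL x (List.mem_toFinset.mp hx)))
    _ ≤ ad.length := ad.toFinset_card_le
  omega

theorem sizeA_eq (fs : FsA) (ad : List (List String))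
    (fB : PySem.Dict (List String) (PySem.Dict String Int))
    (kB : PySem.Dict (List String) Bool) (cur : List String)
    (hI : PInv fs ad fB kB cur) :
    ∀ (f : Nat) (p : List String), p ∈ ad →
      (∀ q ∈ ad, p <+: q → q.length < p.length + f) →
      sizeA fs f p = Tf fB p := by
  intro f
  induction f with
  | zero =>
    intro p hp hb
    exact absurd (hb p hp (List.prefix_refl p)) (by omega)
  | succ f ih =>
    intro p hp hb
    rw [sizeA, PySem.List.foldl_add]
    have hstart : (((fsGetA fs p).1.map (fun fl => fl.2)).sum) =
        fsum (fB.getD p PySem.Dict.empty) := by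
      rw [hI.files_rel p]; rfl
    have hchild : ((fsGetA fs p).2.map (fun x => sizeA fs f (p ++ [x]))).sum =
        ((fsGetA fs p).2.map (fun x => Tf fB (p ++ [x]))).sum := by
      apply congrArg List.sum
      apply List.map_congr_left
      intro x hx
      have hxad : p ++ [x] ∈ ad := (hI.ch p x).mp hx
      apply ih (p ++ [x]) hxad
      intro q hq hpre
      have := hb q hq ((p.prefix_append [x]).trans hpre)
      simp only [List.length_append, List.length_singleton]
      omega
    rw [hstart, hchild]
    exact (T_decomp fs ad fB kB cur hI p hp).symm

-- ---- B's totals table, characterised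
def dictOf (ad : List (List String)) (g : List String → Int) :
    PySem.Dict (List String) Int := PySem.Dict.mk (ad.map (fun p => (p, g p)))

theorem getD_dictOf (ad : List (List String)) (g : List String → Int)
    (hnd : ad.Nodup) (p : List String) (hp : p ∈ ad) :
    (dictOf ad g).getD p 0 = g p := by
  induction ad with
  | nil => cases hp
  | cons a t ih =>
    rw [List.nodup_cons] at hnd
    by_cases ha : a = p
    · subst ha
      simp [dictOf, PySem.Dict.getD, PySem.Dict.get?, List.find?_cons_of_pos]
    · rcases List.mem_cons.mp hp with h | h
      · exact absurd h.symm ha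
      · have := ih hnd.2 h
        simp only [dictOf, PySem.Dict.getD, PySem.Dict.get?,
          List.map_cons] at this ⊢
        rw [List.find?_cons_of_neg]
        · exact this
        · simpa using ha

theorem contains_dictOf (ad : List (List String)) (g : List String → Int)
    (p : List String) : (dictOf ad g).contains p = true ↔ p ∈ ad := by
  simp [dictOf, PySem.Dict.contains, List.any_eq_true, beq_iff_eq]

theorem modify_dictOf (ad : List (List String)) (g : List String → Int) (s : Int)
    (hnd : ad.Nodup) (pref : List String) (hp : pref ∈ ad) :
    (dictOf ad g).modify pref 0 (fun v => v + s) =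
      dictOf ad (fun p => if p = pref then g p + s else g p) := by
  unfold PySem.Dict.modify
  rw [getD_dictOf ad g hnd pref hp]
  unfold PySem.Dict.insert
  rw [if_pos ((contains_dictOf ad g pref).mpr hp)]
  simp only [dictOf, List.map_map]
  apply congrArg PySem.Dict.mk
  apply List.map_congr_left
  intro x hx
  simp only [Function.comp]
  by_cases hxp : x = pref
  · subst hxp; simp
  · simp [hxp]

theorem countP_take_range (q p : List String) :
    (List.range (q.length + 1)).countP (fun k => q.take k == p) =
      if p <+: q then 1 else 0 := by
  by_cases hpre : p <+: q
  · rw [if_pos hpre]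
    have hplen : p.length ≤ q.length := hpre.length_le
    have hcongr : ∀ k ∈ List.range (q.length + 1),
        (q.take k == p) = (k == p.length) := by
      intro k hk
      rw [List.mem_range] at hk
      by_cases he : k = p.length
      · subst he
        simp [(List.prefix_iff_eq_take.mp hpre).symm]
      · have : ¬ q.take k = p := by
          intro ht
          have := congrArg List.length ht
          rw [List.length_take] at this
          omega
        simp [this, he]
    rw [List.countP_congr (fun k hk => by rw [hcongr k hk])]
    have : List.countP (fun k => k == p.length) (List.range (q.length + 1)) =
        List.count p.length (List.range (q.length + 1)) := rfl
    rw [this, List.count_eq_one_of_mem (List.nodup_range) (List.mem_range.mpr (by omega))]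
  · rw [if_neg hpre]
    apply List.countP_eq_zero.mpr
    intro k hk
    rw [List.mem_range] at hk
    simp only [beq_iff_eq]
    intro ht
    exact hpre (ht ▸ List.take_prefix k q)

theorem rollupB_dictOf (ad : List (List String)) (hnd : ad.Nodup)
    (q : List String) (s : Int) (g : List String → Int) :
    rollupB (dictOf ad g) q s =
      dictOf ad (fun p => g p + if p <+: q then s else 0) := by
  have aux : ∀ (ks : List Nat) (g : List String → Int),
      ks.foldl (fun tot k =>
        if tot.contains (q.take k) then tot.modify (q.take k) 0 (fun v => v + s) else tot)
        (dictOf ad g) =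
      dictOf ad (fun p => g p + s * (ks.countP (fun k => q.take k == p) : Int)) := by
    intro ks
    induction ks with
    | nil =>
      intro g
      simp [dictOf]
    | cons k t ih =>
      intro g
      rw [List.foldl_cons]
      by_cases hm : q.take k ∈ ad
      · rw [if_pos ((contains_dictOf ad g _).mpr hm), modify_dictOf ad g s hnd _ hm, ih]
        apply congrArg PySem.Dict.mk
        apply List.map_congr_left
        intro x hx
        simp only [Prod.mk.injEq, true_and]
        rw [List.countP_cons]
        by_cases hxq : x = q.take k
        · rw [if_pos hxq]
          have hb : (q.take k == x) = true := by simp [hxq.symm]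
          rw [hb, if_pos rfl]
          push_cast
          ring
        · rw [if_neg hxq]
          have hb : (q.take k == x) = false := by
            simp only [beq_eq_false_iff_ne, ne_eq]
            exact fun h => hxq h.symm
          rw [hb, if_neg (by simp)]
          push_cast
          ring
      · rw [if_neg (fun hc => hm ((contains_dictOf ad g _).mp hc)), ih]
        apply congrArg PySem.Dict.mk
        apply List.map_congr_left
        intro x hx
        simp only [Prod.mk.injEq, true_and]
        rw [List.countP_cons]
        have : (q.take k == x) = false := by
          simp only [beq_eq_false_iff_ne, ne_eq]
          intro h
          exact hm (h ▸ hx)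
        rw [this]
        simp
  unfold rollupB
  have hrange : PySem.List.pyRange 0 (PySem.List.len q + 1) 1 =
      List.map (fun k : Nat => (k : Int)) (List.range (q.length + 1)) := by
    rw [PySem.List.pyRange_one]
    have h1 : (PySem.List.len q + 1 - 0).toNat = q.length + 1 := by
      unfold PySem.List.len; omega
    rw [h1]
    apply List.map_congr_left
    intro k hk
    omega
  rw [hrange, List.foldl_map]
  refine Eq.trans (?_ : _ = List.foldl
      (fun (tot : PySem.Dict (List String) Int) (k : Nat) =>
        if tot.contains (q.take k) then tot.modify (q.take k) 0 (fun v => v + s) else tot)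
      (dictOf ad g) (List.range (q.length + 1)))
    (Eq.trans (aux (List.range (q.length + 1)) g) ?_)
  · apply PySem.List.foldl_congr_mem
    intro acc x hx
    simp only [PySem.List.slice_to_natCast]
  · apply congrArg PySem.Dict.mk
    apply List.map_congr_left
    intro x hx
    simp only [Prod.mk.injEq, true_and]
    rw [countP_take_range q x]
    split <;> simp

theorem totals_fold (ad : List (List String)) (hnd : ad.Nodup) :
    ∀ (items : List (List String × PySem.Dict String Int)) (g : List String → Int),
      items.foldl (fun tot qm => rollupB tot qm.1 (PySem.Dict.values qm.2).sum)
          (dictOf ad g) =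
        dictOf ad (fun p =>
          g p + (items.map (fun qm => if p <+: qm.1 then fsum qm.2 else 0)).sum) := by
  intro items
  induction items with
  | nil =>
    intro g
    simp only [List.foldl_nil, List.map_nil, List.sum_nil]
    apply congrArg PySem.Dict.mk
    apply List.map_congr_left
    intro x hx
    simp
  | cons qm t ih =>
    intro g
    rw [List.foldl_cons, rollupB_dictOf ad hnd qm.1 _ g, ih]
    apply congrArg PySem.Dict.mk
    apply List.map_congr_left
    intro x hx
    simp only [Prod.mk.injEq, true_and, List.map_cons, List.sum_cons]
    have : (PySem.Dict.values qm.2).sum = fsum qm.2 := rfl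
    rw [this]
    ring

theorem update_app (l acc : List (List String × Int))
    (hnd : ((acc ++ l).map Prod.fst).Nodup) :
    (PySem.Dict.mk acc).update l = PySem.Dict.mk (acc ++ l) := by
  induction l generalizing acc with
  | nil => simp [PySem.Dict.update]
  | cons kv t ih =>
    have hc : (PySem.Dict.mk acc).contains kv.1 = false := by
      rcases hcc : (PySem.Dict.mk acc).contains kv.1 with _ | _
      · rfl
      · exfalso
        simp only [PySem.Dict.contains, List.any_eq_true] at hcc
        rcases hcc with ⟨p, hp, hpk⟩
        rw [List.map_append] at hnd
        rcases List.disjoint_of_nodup_append hnd (List.mem_map_of_mem hp)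
          (by simp [(beq_iff_eq.mp hpk).symm])
    have hstep : (PySem.Dict.mk acc).insert kv.1 kv.2 = PySem.Dict.mk (acc ++ [kv]) := by
      unfold PySem.Dict.insert
      rw [hc]
      simp
    show List.foldl (fun acc p => acc.insert p.1 p.2) (PySem.Dict.mk acc) (kv :: t) = _
    rw [List.foldl_cons]
    have := ih (acc ++ [kv]) (by simpa using hnd)
    rw [hstep]
    show (PySem.Dict.mk (acc ++ [kv])).update t = _
    rw [this]
    simp

theorem ofList_nodup (l : List (List String × Int)) (hnd : (l.map Prod.fst).Nodup) :
    PySem.Dict.ofList l = PySem.Dict.mk l := by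
  unfold PySem.Dict.ofList
  have : PySem.Dict.empty = PySem.Dict.mk ([] : List (List String × Int)) := rfl
  rw [this, update_app l [] (by simpa using hnd)]
  simp

theorem min_match (L : List (List String)) (k1 T : List String → Int)
    (hk : ∀ d ∈ L, k1 d = T d) (hne : L ≠ []) :
    (match PySem.List.min? L k1 with
     | some d => k1 d
     | none => 0) =
    (match PySem.List.min? (L.map T) (fun v => v) with
     | some v => v
     | none => 0) := by
  rcases hA : PySem.List.min? L k1 with _ | d
  · exact absurd ((PySem.List.min?_eq_none_iff L k1).mp hA) hne
  · rcases hB : PySem.List.min? (L.map T) (fun v => v) with _ | v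
    · have := (PySem.List.min?_eq_none_iff (L.map T) _).mp hB
      rw [List.map_eq_nil_iff] at this
      exact absurd this hne
    · simp only []
      have hdL : d ∈ L := PySem.List.min?_mem hA
      rcases List.mem_map.mp (PySem.List.min?_mem hB) with ⟨y, hyL, hyv⟩
      have h1 : v ≤ T d :=
        PySem.List.min?_isMin hB (T d) (List.mem_map_of_mem hdL)
      have h2 : k1 d ≤ k1 y := PySem.List.min?_isMin hA y hyL
      rw [hk d hdL]
      rw [hk y hyL, hyv, hk d hdL] at h2
      omega

theorem part_2_eq : ∀ (lines : List String), Pre_part_2 lines →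
    part_2 lines = part_2_alt lines := by
  intro lines hpre
  have hpre' : validPre lines [] [[]] false = true := hpre
  have hPI0 : PInv PySem.Dict.empty [[]] PySem.Dict.empty (PySem.Dict.mk [([], true)]) [] := by
    refine ⟨by simp, ?_, ?_, ?_, ?_, ?_, ?_, ?_, ?_⟩
    · intro q; simp [fsGetA, PySem.Dict.getD, PySem.Dict.get?, PySem.Dict.empty]
    · intro qm hqm; simp [PySem.Dict.empty] at hqm
    · simp [PySem.Dict.keys, PySem.Dict.empty]
    · intro q x
      simp [fsGetA, PySem.Dict.getD, PySem.Dict.get?, PySem.Dict.empty]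
    · intro q; simp [fsGetA, PySem.Dict.getD, PySem.Dict.get?, PySem.Dict.empty]
    · simp
    · intro q hq k
      simp at hq
      subst hq
      simp
    · simp
  obtain ⟨hI, hflag⟩ := simCB lines PySem.Dict.empty [[]] [] PySem.Dict.empty
    (PySem.Dict.mk [([], true)]) false hPI0 hpre'
  have hparse : parseA lines [] PySem.Dict.empty [[]] =
      ((List.foldl stepC (PySem.Dict.empty, [[]], [], false) lines).1,
       (List.foldl stepC (PySem.Dict.empty, [[]], [], false) lines).2.1) :=
    parseA_eq_foldC lines.length lines le_rfl [] _ _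
  set stC := List.foldl stepC (PySem.Dict.empty, [[]], ([] : List String), false) lines with hstC
  set stB := List.foldl stepB
    (PySem.Dict.empty, PySem.Dict.mk [([], true)], ([] : List String), false) lines with hstB
  have hroot : [] ∈ stC.2.1 := by simpa using hI.pc _ hI.cur_mem 0
  have hsz : ∀ p ∈ stC.2.1, sizeA stC.1 (stC.2.1).length p = Tf stB.1 p := fun p hp =>
    sizeA_eq stC.1 stC.2.1 stB.1 stB.2.1 stC.2.2.1 hI (stC.2.1).length p hp
      (fun q hq hpre2 => depth_bound stC.2.1 hI.ad_nodup hI.pc p q hq hpre2)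
  have hkeys : stB.2.1.keys = stC.2.1 := by
    unfold PySem.Dict.keys
    rw [hI.known_eq]
    simp [Function.comp_def]
  have htot0 : PySem.Dict.ofList (stB.2.1.keys.map (fun p => (p, (0:Int)))) =
      dictOf stC.2.1 (fun _ => 0) := by
    rw [hkeys]
    exact ofList_nodup _ (by simpa [Function.comp_def] using hI.ad_nodup)
  have htot : List.foldl (fun tot qm => rollupB tot qm.1 (PySem.Dict.values qm.2).sum)
      (dictOf stC.2.1 (fun _ => 0)) stB.1.items = dictOf stC.2.1 (fun p => Tf stB.1 p) := by
    rw [totals_fold stC.2.1 hI.ad_nodup stB.1.items (fun _ => 0)]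
    apply congrArg PySem.Dict.mk
    apply List.map_congr_left
    intro x hx
    simp [Tf]
  simp only [part_2, part_2_alt]
  rw [hparse]
  rw [← hstB]
  simp only []
  rw [htot0, htot]
  rw [getD_dictOf stC.2.1 _ hI.ad_nodup [] hroot]
  have hvals : (dictOf stC.2.1 (fun p => Tf stB.1 p)).values =
      stC.2.1.map (fun p => Tf stB.1 p) := by
    simp [dictOf, PySem.Dict.values, Function.comp_def]
  rw [hvals, List.filter_map]
  have hfeq : List.filter
      (fun d => decide (30000000 - (70000000 - sizeA stC.1 stC.2.1.length []) ≤
        sizeA stC.1 stC.2.1.length d)) stC.2.1 =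
      List.filter ((fun s => decide (Tf stB.1 [] - 40000000 ≤ s)) ∘ (fun p => Tf stB.1 p))
        stC.2.1 := by
    apply List.filter_congr
    intro d hd
    simp only [Function.comp]
    rw [hsz [] hroot, hsz d hd]
    apply decide_eq_decide.mpr
    omega
  rw [hfeq]
  apply min_match
  · intro d hd
    exact hsz d (List.mem_of_mem_filter hd)
  · intro hemp
    have : ([] : List String) ∈ List.filter
        ((fun s => decide (Tf stB.1 [] - 40000000 ≤ s)) ∘ (fun p => Tf stB.1 p)) stC.2.1 := by
      rw [List.mem_filter]
      refine ⟨hroot, ?_⟩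
      simp only [Function.comp]
      apply decide_eq_true
      omega
    rw [hemp] at this
    cases this

-- ===== VERDICT (by name: the statement is the Claim_ definition above) =====
theorem part_2_spec : Claim_equal_part_2 := by
  intro lines _ hpre
  exact part_2_eq lines hpre
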